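-- pv_equiv track=rewrite | github.com/jigjnasu/discrete_mathematics_and_its_applications | chapter_8_advanced_counting_techniques/8.6_applications_of_inclusion_exclusion/exercises/repo/onto.py | onto
-- ===== SOURCE A (Python) =====
-- def fact(n):
--     r = 1
--     for i in range(1, n+1):
--         r = r * i
--     return r
--
-- def onto(m, n)->None:
--     '''
--         distribute m elements to n
--         formula for onto function is
--         R = n^m - C(n, 1)(n-1)^m + C(n, 2)(n-2)^m - ... + (-1)^n-1 C(n, n-1).1^m
--     '''
--     r = pow(n, m)
--     num = fact(n)
--     for i in range(1, n):
--         den_a = fact(i)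
--         den_b = fact(n - i)
--         temp = num // (den_a * den_b)
--         temp = temp * pow(n-i, m)
--         if i & 1 == 1:
--             r -= temp
--         else:
--             r += temp
--     return r
-- ===== SOURCE B (Python) =====
-- def onto(m, n):
--     # inclusion-exclusion with incrementally updated binomial coefficients
--     r = pow(n, m)
--     c = 1
--     sign = 1
--     for i in range(1, n):
--         c = c * (n - i + 1) // i
--         sign = -sign
--         r += sign * c * pow(n - i, m)
--     return r
-- ===== Notes on version B (the rewrite author's own statement) =====
-- stated objective: alternative
-- what changed: B replaces the per-term factorial recomputation (fact(n), fact(i), fact(n-i) inside the loop) by a single running binomial coefficient updated with C(n,i) = C(n,i-1)*(n-i+1)//i and a running sign: O(n) coefficient multiplications per call instead of O(n^2) (measured 5-17x faster on the generated sizes, but the shared pow(n-i, m) cost dominates at the largest size, so no speed is claimed).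
-- outside the precondition, e.g. on onto(-3, 2): A returns -1.875, B returns -1.875
import Mathlib
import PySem

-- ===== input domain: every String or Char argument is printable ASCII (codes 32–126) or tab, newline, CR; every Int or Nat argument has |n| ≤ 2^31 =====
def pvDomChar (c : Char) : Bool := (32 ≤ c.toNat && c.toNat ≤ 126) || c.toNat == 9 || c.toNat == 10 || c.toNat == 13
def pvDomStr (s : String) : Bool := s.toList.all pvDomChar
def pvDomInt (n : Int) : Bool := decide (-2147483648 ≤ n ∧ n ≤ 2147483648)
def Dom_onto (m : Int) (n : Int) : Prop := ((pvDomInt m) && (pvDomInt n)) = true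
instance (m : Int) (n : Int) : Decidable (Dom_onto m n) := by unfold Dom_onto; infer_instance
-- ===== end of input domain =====

-- B computes each binomial coefficient incrementally (C(n,i)=C(n,i-1)*(n-i+1)//i) instead of
-- rebuilding three factorials per iteration: fewer multiplications, same values.

-- ===== PORT A =====
def factA (n : Int) : Int :=
  (PySem.List.pyRange 1 (n + 1) 1).foldl (fun r i => r * i) 1

def onto (m : Int) (n : Int) : Int :=
  let num := factA n
  (PySem.List.pyRange 1 n 1).foldl (fun r i =>
    let den_a := factA i
    let den_b := factA (n - i)
    let temp := PySem.Int.floordiv num (den_a * den_b)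
    let temp := temp * (n - i) ^ m.toNat
    -- Int.land is Python's `i & 1` (two's-complement bitwise AND)
    if Int.land i 1 == 1 then r - temp else r + temp) (n ^ m.toNat)

-- ===== PORT B =====
def onto_alt (m : Int) (n : Int) : Int :=
  ((PySem.List.pyRange 1 n 1).foldl (fun (st : Int × Int × Int) i =>
    let c := PySem.Int.floordiv (st.2.1 * (n - i + 1)) i
    let sign := -st.2.2
    (st.1 + sign * c * (n - i) ^ m.toNat, c, sign)) (n ^ m.toNat, 1, 1)).1

-- ===== PRECONDITION & SPEC =====
-- Pre_ excludes m < 0, where Python's pow leaves the integers: A (and B) return a float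
-- there (or raise ZeroDivisionError when a base is 0), never an int.
def Pre_onto (m : Int) (n : Int) : Prop := 0 ≤ m
instance (m : Int) (n : Int) : Decidable (Pre_onto m n) := by unfold Pre_onto; infer_instance
def pvWitness_onto : Int × Int := (3, 2)

def Spec_onto (m : Int) (n : Int) (out : Int) : Prop := out = onto_alt m n
instance (m : Int) (n : Int) (out : Int) : Decidable (Spec_onto m n out) := by unfold Spec_onto; infer_instance

-- ===== CLAIM (what is proved, stated in full; the proofs are below) =====
def Claim_equal_onto : Prop := ∀ (m : Int) (n : Int), Dom_onto m n → Pre_onto m n → Spec_onto m n (onto m n)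

-- ===== LEMMAS AND PROOFS =====

-- factA computes the factorial of its (nonnegative) argument
lemma factA_eq (k : Nat) : factA (k : Int) = (Nat.factorial k : Int) := by
  induction k with
  | zero =>
      simp [factA, PySem.List.pyRange_one_eq_nil, Nat.factorial]
  | succ j ih =>
      have h1 : (1 : Int) ≤ (j : Int) + 1 := by omega
      have hsplit := PySem.List.pyRange_one_succ_right (a := 1) (b := (j : Int) + 1) h1
      have hcast : ((j + 1 : Nat) : Int) + 1 = ((j : Int) + 1) + 1 := by omega
      unfold factA at ih ⊢
      rw [hcast, hsplit, List.foldl_append, ih]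
      simp [Nat.factorial_succ]
      ring

-- A's term: floor-divided factorials give the binomial coefficient
lemma temp_eq_choose (N i : Nat) (hi : i ≤ N) :
    PySem.Int.floordiv (Nat.factorial N : Int)
      ((Nat.factorial i : Int) * (Nat.factorial (N - i) : Int)) = (N.choose i : Int) := by
  have hfac : Nat.factorial N = N.choose i * (Nat.factorial i * Nat.factorial (N - i)) := by
    rw [← Nat.choose_mul_factorial_mul_factorial hi]; ring
  have hpos : 0 < Nat.factorial i * Nat.factorial (N - i) :=
    Nat.mul_pos (Nat.factorial_pos i) (Nat.factorial_pos (N - i))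
  calc PySem.Int.floordiv (Nat.factorial N : Int)
        ((Nat.factorial i : Int) * (Nat.factorial (N - i) : Int))
      = PySem.Int.floordiv ((Nat.factorial N : Nat) : Int)
        (((Nat.factorial i * Nat.factorial (N - i) : Nat)) : Int) := by push_cast; ring_nf
    _ = ((Nat.factorial N / (Nat.factorial i * Nat.factorial (N - i)) : Nat) : Int) :=
        PySem.Int.floordiv_natCast _ _
    _ = (N.choose i : Int) := by
        rw [hfac, Nat.mul_div_cancel _ hpos]

-- B's update: the incremental binomial step lands on the next coefficient
lemma cstep_eq_choose (N j : Nat) (hjN : j + 1 ≤ N) :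
    PySem.Int.floordiv ((N.choose j : Int) * ((N : Int) - ((j + 1 : Nat) : Int) + 1))
      ((j + 1 : Nat) : Int) = (N.choose (j + 1) : Int) := by
  have hsub : (N : Int) - ((j + 1 : Nat) : Int) + 1 = ((N - j : Nat) : Int) := by
    have : j ≤ N := by omega
    push_cast [Nat.cast_sub this]; ring
  have hid : N.choose j * (N - j) = N.choose (j + 1) * (j + 1) :=
    (Nat.choose_succ_right_eq N j).symm
  calc PySem.Int.floordiv ((N.choose j : Int) * ((N : Int) - ((j + 1 : Nat) : Int) + 1))
        ((j + 1 : Nat) : Int)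
      = PySem.Int.floordiv (((N.choose j * (N - j) : Nat)) : Int) ((j + 1 : Nat) : Int) := by
        rw [hsub]; push_cast; ring_nf
    _ = ((N.choose j * (N - j) / (j + 1) : Nat) : Int) := PySem.Int.floordiv_natCast _ _
    _ = (N.choose (j + 1) : Int) := by rw [hid, Nat.mul_div_cancel _ (by omega)]

-- parity of the bitwise test on a nonnegative int
lemma land_one_cast (k : Nat) : Int.land (k : Int) 1 = ((k % 2 : Nat) : Int) := by
  have : Int.land (k : Int) 1 = ((k &&& 1 : Nat) : Int) := rfl
  rw [this, Nat.and_one_is_mod]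

-- the loop invariant: B's fold carries A's accumulator plus the running binomial and sign
lemma inv (m : Int) (N : Nat) :
    ∀ k : Nat, 1 ≤ k → k ≤ N →
    (PySem.List.pyRange 1 (k : Int) 1).foldl (fun (st : Int × Int × Int) i =>
        let c := PySem.Int.floordiv (st.2.1 * ((N : Int) - i + 1)) i
        let sign := -st.2.2
        (st.1 + sign * c * ((N : Int) - i) ^ m.toNat, c, sign)) (((N : Int)) ^ m.toNat, 1, 1)
    = ((PySem.List.pyRange 1 (k : Int) 1).foldl (fun r i =>
        let den_a := factA i
        let den_b := factA ((N : Int) - i)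
        let temp := PySem.Int.floordiv (factA (N : Int)) (den_a * den_b)
        let temp := temp * ((N : Int) - i) ^ m.toNat
        if Int.land i 1 == 1 then r - temp else r + temp) (((N : Int)) ^ m.toNat),
       (N.choose (k - 1) : Int), (-1 : Int) ^ (k - 1)) := by
  intro k
  induction k with
  | zero => omega
  | succ j ih =>
      intro _ hkN
      cases j with
      | zero =>
          simp [PySem.List.pyRange_one_eq_nil]
      | succ j' =>
          have hj1 : 1 ≤ j' + 1 := by omega
          have hjN : j' + 1 ≤ N := by omega
          have hsplit := PySem.List.pyRange_one_succ_right (a := 1) (b := ((j' + 1 : Nat) : Int))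
            (by exact_mod_cast hj1)
          have hcast : ((j' + 1 + 1 : Nat) : Int) = ((j' + 1 : Nat) : Int) + 1 := by push_cast; ring
          rw [hcast, hsplit, List.foldl_append, List.foldl_append, ih hj1 hjN]
          simp only [List.foldl_cons, List.foldl_nil, Nat.add_sub_cancel]
          rw [cstep_eq_choose N j' hjN]
          have hsub : (N : Int) - ((j' + 1 : Nat) : Int) = ((N - (j' + 1) : Nat) : Int) := by
            omega
          rw [hsub, factA_eq, factA_eq, factA_eq, temp_eq_choose N (j' + 1) hjN, land_one_cast]
          rcases Nat.even_or_odd (j' + 1) with he | ho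
          · have h2 : (j' + 1) % 2 = 0 := Nat.even_iff.mp he
            have hj'odd : Odd j' := by
              rcases Nat.even_or_odd j' with h | h
              · exact absurd h (Nat.even_add_one.mp he)
              · exact h
            rw [h2, hj'odd.neg_one_pow, he.neg_one_pow]
            norm_num
          · have h2 : (j' + 1) % 2 = 1 := Nat.odd_iff.mp ho
            have hj'even : Even j' := by
              rcases Nat.even_or_odd j' with h | h
              · exact h
              · exact absurd (Nat.even_add_one.mpr (Nat.not_even_iff_odd.mpr h)) (Nat.not_even_iff_odd.mpr ho)
            rw [h2, hj'even.neg_one_pow, ho.neg_one_pow]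
            norm_num
            ring

-- final assembly
theorem onto_spec : Claim_equal_onto := by
  intro m n _ hm
  unfold Spec_onto onto onto_alt
  rcases le_or_gt n 1 with hn | hn
  · rw [PySem.List.pyRange_one_eq_nil hn]
    simp
  · have hn0 : 0 ≤ n := by omega
    have hnN : n = ((n.toNat : Nat) : Int) := (Int.toNat_of_nonneg hn0).symm
    have hN1 : 1 ≤ n.toNat := by omega
    rw [hnN]
    rw [inv m n.toNat n.toNat hN1 (le_refl _)]
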